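-- pv_equiv track=rewrite | github.com/KhoiBui16/28Tech_Code_Online | Python/Source Code Python Contest/Contest_10_ChuoiKyTu/Bai27_XauConLienTiep2.py | find_max_difference_sub_str
-- ===== SOURCE A (Python) =====
-- def find_max_difference_sub_str(s):
--     max_len, sub_len = 1, 1
--     max_sub_str, sub_str = s[0], s[0]
--
--     # Cách 2: thay vì xử lý kí tự khác nhau => mẹo ta thêm vào kí tự giống kí tự cuối
--     # => thành trường hợp khác nhau ở kí tự cuối thì ko cần xử lý bị trùng
--     # s += s[-1]
--
--     for i in range(1, len(s)):
--         if s[i] == s[i - 1]: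
--             if sub_len > max_len:
--                 max_len = sub_len
--                 max_sub_str = sub_str
--             elif sub_len == max_len:
--                 max_sub_str = max(max_sub_str, sub_str)
--             sub_str = s[i]
--             sub_len = 1
--         else:
--             sub_len += 1
--             sub_str += s[i]
--
--     # C1: xử lý kí tự cuối nếu không thêm vào cuối kí tự giống kí tự cuối
--     if sub_len > max_len:
--         max_len = sub_len
--         max_sub_str = sub_str
--     elif sub_len == max_len:
--         max_sub_str = max(max_sub_str, sub_str)
--
--     return max_sub_str
-- ===== SOURCE B (Python) =====
-- def find_max_difference_sub_str(s):
--     runs = []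
--     cur = s[0]
--     for i in range(1, len(s)):
--         if s[i] == s[i - 1]:
--             runs.append(cur)
--             cur = s[i]
--         else:
--             cur += s[i]
--     runs.append(cur)
--     return max(runs, key=lambda r: (len(r), r))
-- ===== Notes on version B (the rewrite author's own statement) =====
-- stated objective: simpler
-- what changed: A's single interleaved scan carrying four pieces of running-maximum state is replaced by a two-phase decomposition: split the string into its maximal distinct-adjacent runs, then pick max(runs, key=(len, r)).
-- outside the precondition, e.g. on find_max_difference_sub_str(''): A raises IndexError, B raises IndexError
import Mathlib
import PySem

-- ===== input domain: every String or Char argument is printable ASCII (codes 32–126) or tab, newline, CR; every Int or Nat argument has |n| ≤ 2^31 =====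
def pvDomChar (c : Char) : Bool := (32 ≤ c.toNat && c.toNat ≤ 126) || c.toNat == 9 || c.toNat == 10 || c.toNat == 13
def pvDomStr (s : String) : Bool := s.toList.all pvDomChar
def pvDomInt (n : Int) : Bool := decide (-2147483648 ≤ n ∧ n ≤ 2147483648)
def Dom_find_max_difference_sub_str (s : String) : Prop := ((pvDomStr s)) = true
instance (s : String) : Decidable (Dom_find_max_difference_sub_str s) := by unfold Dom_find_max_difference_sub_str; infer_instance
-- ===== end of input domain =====

-- B replaces A's interleaved scan-with-running-maximum by a two-phase decomposition:
-- split the string into its maximal distinct-adjacent runs, then select max by key (length, string).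
-- Equivalence is about the return value; neither program mutates its argument.

-- Python's lexicographic '<' on strings (exact on the ASCII domain: code-point order).
def lexLt : List Char → List Char → Bool
  | [], [] => false
  | [], _ :: _ => true
  | _ :: _, [] => false
  | a :: as, b :: bs => if a < b then true else if b < a then false else lexLt as bs

-- ===== PORT A =====
-- Python's max(x, y) on two strings.
def chMax (a b : List Char) : List Char := if lexLt a b then b else a

-- the for-loop of A, carrying (max_len, max_sub_str, sub_len, sub_str, previous char);
-- the [] case is A's final if/elif after the loop.
def aGo (maxLen : Int) (maxSub : List Char) (subLen : Int) (sub : List Char) (prev : Char) :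
    List Char → List Char
  | [] =>
      if subLen > maxLen then sub
      else if subLen = maxLen then chMax maxSub sub
      else maxSub
  | c :: rest =>
      if c = prev then
        if subLen > maxLen then aGo subLen sub 1 [c] c rest
        else if subLen = maxLen then aGo maxLen (chMax maxSub sub) 1 [c] c rest
        else aGo maxLen maxSub 1 [c] c rest
      else aGo maxLen maxSub (subLen + 1) (sub ++ [c]) c rest

def find_max_difference_sub_str (s : String) : String :=
  match s.toList with
  | [] => ""   -- unreachable: Python raises IndexError on s[0]; Pre_ excludes ""
  | c :: rest => String.ofList (aGo 1 [c] 1 [c] c rest)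

-- ===== PORT B =====
-- phase 1: split into maximal runs of distinct-adjacent characters
def bSplit (cur : List Char) (prev : Char) : List Char → List (List Char)
  | [] => [cur]
  | c :: rest => if c = prev then cur :: bSplit [c] c rest else bSplit (cur ++ [c]) c rest

-- Python's key (len(r), r) compared: best < r
def keyLt (a b : List Char) : Bool :=
  decide (a.length < b.length) || (decide (a.length = b.length) && lexLt a b)

-- phase 2: Python's max(runs, key=...) — keep the first maximal element
def keyMax (r : List Char) (rs : List (List Char)) : List Char :=
  rs.foldl (fun best x => if keyLt best x then x else best) r

def find_max_difference_sub_str_alt (s : String) : String :=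
  match s.toList with
  | [] => ""   -- unreachable: B also raises on "" ; Pre_ excludes it
  | c :: rest =>
      match bSplit [c] c rest with
      | [] => ""  -- bSplit never returns []
      | r :: rs => String.ofList (keyMax r rs)

-- ===== PRECONDITION & SPEC =====
-- Pre_ excludes only the empty string, on which Python A raises IndexError (s[0]).
def Pre_find_max_difference_sub_str (s : String) : Prop := s ≠ ""
instance (s : String) : Decidable (Pre_find_max_difference_sub_str s) := by
  unfold Pre_find_max_difference_sub_str; infer_instance
def pvWitness_find_max_difference_sub_str : String := "aab"

def Spec_find_max_difference_sub_str (s : String) (out : String) : Prop := out = find_max_difference_sub_str_alt s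
instance (s : String) (out : String) : Decidable (Spec_find_max_difference_sub_str s out) := by unfold Spec_find_max_difference_sub_str; infer_instance

-- ===== CLAIM (what is proved, stated in full; the proofs are below) =====
def Claim_equal_find_max_difference_sub_str : Prop := ∀ (s : String), Dom_find_max_difference_sub_str s → Pre_find_max_difference_sub_str s → Spec_find_max_difference_sub_str s (find_max_difference_sub_str s)

-- ===== LEMMAS AND PROOFS =====

-- B's fold step
def pick (m r : List Char) : List Char := if keyLt m r then r else m

-- A's combine (in the duplicate branch and after the loop) equals B's pick,
-- when the tracked Int lengths are the real lengths.
theorem step_eq_pick (m r : List Char) :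
    (if (r.length : Int) > (m.length : Int) then r
     else if (r.length : Int) = (m.length : Int) then chMax m r else m) = pick m r := by
  unfold pick keyLt chMax
  by_cases h1 : m.length < r.length
  · have h2 : ((r.length : Int) > (m.length : Int)) := by omega
    simp [h1, h2]
  · have h2 : ¬ ((r.length : Int) > (m.length : Int)) := by omega
    rw [if_neg h2]
    by_cases h3 : m.length = r.length
    · have h4 : ((r.length : Int) = (m.length : Int)) := by omega
      rw [if_pos h4]
      by_cases h5 : lexLt m r <;> simp [h3, h5]
    · have h4 : ¬ ((r.length : Int) = (m.length : Int)) := by omega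
      rw [if_neg h4]
      simp [h1, h3]

-- main invariant: A's loop computes the fold of pick over the runs B builds
theorem aGo_eq_foldl (rest : List Char) :
    ∀ (prev : Char) (sub m : List Char),
      aGo (m.length : Int) m (sub.length : Int) sub prev rest
        = (bSplit sub prev rest).foldl pick m := by
  induction rest with
  | nil =>
      intro prev sub m
      simp only [aGo, bSplit, List.foldl]
      exact step_eq_pick m sub
  | cons c rest ih =>
      intro prev sub m
      by_cases hc : c = prev
      · simp only [aGo, bSplit, if_pos hc, List.foldl_cons]
        by_cases h1 : (sub.length : Int) > (m.length : Int)
        · rw [if_pos h1]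
          have hp : pick m sub = sub := by
            rw [← step_eq_pick, if_pos h1]
          rw [hp]
          simpa using ih c [c] sub
        · rw [if_neg h1]
          by_cases h2 : (sub.length : Int) = (m.length : Int)
          · rw [if_pos h2]
            have hp : pick m sub = chMax m sub := by
              rw [← step_eq_pick, if_neg h1, if_pos h2]
            rw [hp]
            have hlen : ((chMax m sub).length : Int) = (m.length : Int) := by
              unfold chMax; split <;> omega
            have := ih c [c] (chMax m sub)
            rw [hlen] at this
            simpa using this
          · rw [if_neg h2]
            have hp : pick m sub = m := by
              rw [← step_eq_pick, if_neg h1, if_neg h2]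
            rw [hp]
            simpa using ih c [c] m
      · simp only [aGo, bSplit, if_neg hc]
        have hlen : (sub.length : Int) + 1 = (((sub ++ [c]).length : Nat) : Int) := by
          simp
        rw [hlen]
        exact ih c (sub ++ [c]) m

-- the head run returned by bSplit extends the seed cur
theorem bSplit_head (rest : List Char) :
    ∀ (cur : List Char) (prev : Char),
      ∃ t rs, bSplit cur prev rest = (cur ++ t) :: rs := by
  induction rest with
  | nil => intro cur prev; exact ⟨[], [], by simp [bSplit]⟩
  | cons c rest ih =>
      intro cur prev
      by_cases hc : c = prev
      · exact ⟨[], bSplit [c] c rest, by simp [bSplit, hc]⟩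
      · obtain ⟨t, rs, h⟩ := ih (cur ++ [c]) c
        exact ⟨[c] ++ t, rs, by simp [bSplit, hc, h]⟩

-- folding from the seed cur equals folding from the first run (which extends cur)
theorem foldl_seed (cur : List Char) (prev : Char) (rest : List Char) :
    (bSplit cur prev rest).foldl pick cur
      = match bSplit cur prev rest with
        | [] => cur
        | r :: rs => keyMax r rs := by
  obtain ⟨t, rs, h⟩ := bSplit_head rest cur prev
  rw [h]
  simp only [List.foldl_cons]
  have hp : pick cur (cur ++ t) = cur ++ t := by
    cases t with
    | nil => simp [pick]
    | cons a as =>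
        unfold pick keyLt
        simp
  rw [hp]
  rfl

theorem toList_ne_nil (s : String) (h : s ≠ "") : s.toList ≠ [] := by
  intro hn
  exact h (String.toList_inj.mp (by simp [hn]))

-- ===== VERDICT (by name: the statement is the Claim_ definition above) =====
theorem find_max_difference_sub_str_spec : Claim_equal_find_max_difference_sub_str := by
  intro s _ hpre
  unfold Spec_find_max_difference_sub_str
  unfold find_max_difference_sub_str find_max_difference_sub_str_alt
  have hne := toList_ne_nil s hpre
  cases h : s.toList with
  | nil => exact absurd h hne
  | cons c rest =>
      simp only []
      have h1 : aGo 1 [c] 1 [c] c rest = (bSplit [c] c rest).foldl pick [c] := by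
        simpa using aGo_eq_foldl rest c [c] [c]
      rw [h1, foldl_seed]
      obtain ⟨t, rs, hsp⟩ := bSplit_head rest [c] c
      rw [hsp]
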